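-- pv_equiv track=rewrite | github.com/jessepurcell/AdventOfCode2023 | day_02/cube_conundrum.py | is_valid_game
-- ===== SOURCE A (Python) =====
-- def is_valid_game(games, red=12, green=13, blue=14):
--     for g in games:
--         g = dict(g)
--         if g.get('red') and g.get('red') > red:
--             return False
--         if g.get('green') and g.get('green') > green:
--             return False
--         if g.get('blue') and g.get('blue') > blue:
--             return False
--     return True
-- ===== SOURCE B (Python) =====
-- def is_valid_game(games, red=12, green=13, blue=14):
--     limits = {'red': red, 'green': green, 'blue': blue}
--     maxes = {'red': None, 'green': None, 'blue': None}
--     for g in games: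
--         d = dict(g)
--         for c in ('red', 'green', 'blue'):
--             v = d.get(c)
--             if v and (maxes[c] is None or v > maxes[c]):
--                 maxes[c] = v
--     return all(maxes[c] is None or maxes[c] <= limits[c] for c in limits)
-- ===== Notes on version B (the rewrite author's own statement) =====
-- stated objective: alternative
-- what changed: A scans game by game and returns False as soon as one colour count exceeds its limit; B makes one aggregation pass building a per-colour running maximum of the truthy counts and only afterwards compares that max table against a limits dict.
import Mathlib
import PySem

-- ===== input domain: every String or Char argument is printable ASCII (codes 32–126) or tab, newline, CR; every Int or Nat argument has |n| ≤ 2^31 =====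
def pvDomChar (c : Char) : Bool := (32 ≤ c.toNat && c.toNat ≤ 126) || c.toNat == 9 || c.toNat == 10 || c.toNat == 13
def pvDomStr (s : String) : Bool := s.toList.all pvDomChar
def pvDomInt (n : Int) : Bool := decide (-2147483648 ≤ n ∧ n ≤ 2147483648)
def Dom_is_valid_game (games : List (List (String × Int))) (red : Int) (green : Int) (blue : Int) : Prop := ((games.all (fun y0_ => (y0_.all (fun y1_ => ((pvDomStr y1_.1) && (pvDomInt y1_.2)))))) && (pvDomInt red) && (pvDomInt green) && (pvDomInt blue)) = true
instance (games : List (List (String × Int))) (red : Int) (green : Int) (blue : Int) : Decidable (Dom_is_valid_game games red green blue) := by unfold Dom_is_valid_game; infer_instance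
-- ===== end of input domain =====

-- B replaces A's per-game early-return scan by one aggregation pass building a per-colour
-- running maximum of the truthy counts, checked against the limits afterwards (objective: alternative).

-- ===== PORT A =====
-- Python truthiness of `d.get(c)` for an int-valued dict: present and nonzero.
def pvTruthy (o : Option Int) : Bool :=
  match o with
  | some v => v != 0
  | none => false

def is_valid_game (games : List (List (String × Int))) (red : Int) (green : Int) (blue : Int) : Bool :=
  match games with
  | [] => true
  | g :: rest =>
    let d := PySem.Dict.ofList g
    if pvTruthy (d.get? "red") && decide (red < (d.get? "red").getD 0) then false
    else if pvTruthy (d.get? "green") && decide (green < (d.get? "green").getD 0) then false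
    else if pvTruthy (d.get? "blue") && decide (blue < (d.get? "blue").getD 0) then false
    else is_valid_game rest red green blue

-- ===== PORT B =====
-- `if v and (maxes[c] is None or v > maxes[c]): maxes[c] = v`
def pvUpdMax (m : Option Int) (v? : Option Int) : Option Int :=
  match v? with
  | none => m
  | some v =>
    if v != 0 && (match m with | none => true | some m0 => decide (m0 < v)) then some v else m

-- `maxes[c] is None or maxes[c] <= limits[c]`
def pvOkMax (m : Option Int) (lim : Int) : Bool :=
  match m with
  | none => true
  | some v => decide (v ≤ lim)

def is_valid_game_alt (games : List (List (String × Int))) (red : Int) (green : Int) (blue : Int) : Bool :=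
  let s := games.foldl
    (fun (s : Option Int × Option Int × Option Int) g =>
      let d := PySem.Dict.ofList g
      (pvUpdMax s.1 (d.get? "red"), pvUpdMax s.2.1 (d.get? "green"), pvUpdMax s.2.2 (d.get? "blue")))
    (none, none, none)
  pvOkMax s.1 red && pvOkMax s.2.1 green && pvOkMax s.2.2 blue

-- ===== PRECONDITION & SPEC =====
def Spec_is_valid_game (games : List (List (String × Int))) (red : Int) (green : Int) (blue : Int) (out : Bool) : Prop := out = is_valid_game_alt games red green blue
instance (games : List (List (String × Int))) (red : Int) (green : Int) (blue : Int) (out : Bool) : Decidable (Spec_is_valid_game games red green blue out) := by unfold Spec_is_valid_game; infer_instance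

-- ===== CLAIM (what is proved, stated in full; the proofs are below) =====
def Claim_equal_is_valid_game : Prop := ∀ (games : List (List (String × Int))) (red : Int) (green : Int) (blue : Int), Dom_is_valid_game games red green blue → Spec_is_valid_game games red green blue (is_valid_game games red green blue)

-- ===== LEMMAS AND PROOFS =====

-- one game exceeds the limit for colour c
def pvBad (g : List (String × Int)) (c : String) (lim : Int) : Bool :=
  pvTruthy ((PySem.Dict.ofList g).get? c) && decide (lim < ((PySem.Dict.ofList g).get? c).getD 0)

theorem okMax_upd (m v? : Option Int) (lim : Int) :
    pvOkMax (pvUpdMax m v?) lim = (pvOkMax m lim && !(pvTruthy v? && decide (lim < v?.getD 0))) := by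
  cases v? with
  | none => simp [pvUpdMax, pvTruthy]
  | some v =>
    by_cases hv : v = 0
    · cases m <;> simp [pvUpdMax, pvTruthy, pvOkMax, hv]
    · cases m with
      | none =>
        by_cases h : v ≤ lim <;>
          simp [pvUpdMax, pvTruthy, pvOkMax, hv, h] <;> omega
      | some m0 =>
        by_cases hm : m0 < v <;> by_cases h : v ≤ lim <;> by_cases h0 : m0 ≤ lim <;>
          simp [pvUpdMax, pvTruthy, pvOkMax, hv, hm, h, h0] <;> omega

theorem fold_ok (games : List (List (String × Int))) (red green blue : Int)
    (s : Option Int × Option Int × Option Int) :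
    (let t := games.foldl
      (fun (s : Option Int × Option Int × Option Int) g =>
        let d := PySem.Dict.ofList g
        (pvUpdMax s.1 (d.get? "red"), pvUpdMax s.2.1 (d.get? "green"), pvUpdMax s.2.2 (d.get? "blue"))) s
     (pvOkMax t.1 red && pvOkMax t.2.1 green && pvOkMax t.2.2 blue)) =
    ((pvOkMax s.1 red && pvOkMax s.2.1 green && pvOkMax s.2.2 blue) &&
      games.all (fun g => !pvBad g "red" red && !pvBad g "green" green && !pvBad g "blue" blue)) := by
  induction games generalizing s with
  | nil => simp
  | cons g rest ih =>
    simp only [List.foldl_cons, List.all_cons]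
    rw [ih]
    simp only [okMax_upd, pvBad]
    cases pvOkMax s.1 red <;> cases pvOkMax s.2.1 green <;> cases pvOkMax s.2.2 blue <;>
      cases h1 : (pvTruthy ((PySem.Dict.ofList g).get? "red") && decide (red < ((PySem.Dict.ofList g).get? "red").getD 0)) <;>
      cases h2 : (pvTruthy ((PySem.Dict.ofList g).get? "green") && decide (green < ((PySem.Dict.ofList g).get? "green").getD 0)) <;>
      cases h3 : (pvTruthy ((PySem.Dict.ofList g).get? "blue") && decide (blue < ((PySem.Dict.ofList g).get? "blue").getD 0)) <;>
      simp

theorem a_eq_all (games : List (List (String × Int))) (red green blue : Int) :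
    is_valid_game games red green blue =
      games.all (fun g => !pvBad g "red" red && !pvBad g "green" green && !pvBad g "blue" blue) := by
  induction games with
  | nil => rfl
  | cons g rest ih =>
    rw [List.all_cons, ← ih]
    show (if pvBad g "red" red then false
          else if pvBad g "green" green then false
          else if pvBad g "blue" blue then false
          else is_valid_game rest red green blue) = _
    by_cases h1 : pvBad g "red" red <;> by_cases h2 : pvBad g "green" green <;>
      by_cases h3 : pvBad g "blue" blue <;> simp [h1, h2, h3]

-- ===== VERDICT (by name: the statement is the Claim_ definition above) =====
theorem is_valid_game_spec : Claim_equal_is_valid_game := by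
  intro games red green blue _
  show is_valid_game games red green blue = is_valid_game_alt games red green blue
  rw [a_eq_all]
  unfold is_valid_game_alt
  rw [fold_ok games red green blue (none, none, none)]
  simp [pvOkMax]
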